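-- pv_equiv track=rewrite | github.com/purvilmehta06/CSCI-561-Foundations-of-Artificial-Intelligence | Homework 3/homework_v1.py | make_variables_standardize
-- ===== SOURCE A (Python) =====
-- def replace_string(unified_string, query_var, var):
--     unified_string = unified_string.replace("(" + query_var + ",", "(" + var + ",")
--     unified_string = unified_string.replace("," + query_var + ",", "," + var + ",")
--     unified_string = unified_string.replace("," + query_var + ")", "," + var + ")")
--     unified_string = unified_string.replace("(" + query_var + ")", "(" + var + ")")
--     return unified_string
--
-- def standardize_local(std_var):
--     if (ord(std_var[1]) == ord('z')):
--         std_var = chr(ord(std_var[0])+1) + 'a%'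
--     else:
--         std_var = std_var[0] + chr(ord(std_var[1])+1) + '%'
--     return std_var
--
-- def make_variables_standardize(rule, temp, variables_in_unification_map):
--     variable_map = {}
--     new_rule = rule
--     for ind in range(len(rule)):
--         if (rule[ind] == '('):
--             for i in range(ind+1, len(rule), 1):
--                 if (rule[i] == ')'):
--                     variables = rule[ind+1:i].split(',')
--                     for j in range(len(variables)):
--                         if (variables[j][0].islower() and variables[j] not in variable_map):
--                             temp = standardize_local(temp)
--                             temp = temp.replace('%', '#')
--                             while temp in variables_in_unification_map:
--                                 temp = standardize_local(temp)
--                                 temp = temp.replace('%', '#')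
--                             temp = temp.replace('#', '%')
--                             variable_map[variables[j]] = temp
--                     break
--     new_rule = rule
--     for var in reversed(sorted(variable_map.keys())):
--         var = var.replace('%', '#')
--         if var not in variables_in_unification_map:
--             new_rule = replace_string(new_rule, var, variable_map[var])
--     new_rule = new_rule.replace('%', '#')
--     return new_rule, temp.replace('%', '#')
-- ===== SOURCE B (Python) =====
-- def _fresh(t, vset):
--     # advance the two-character counter until the '#'-marked candidate is unused
--     while True:
--         a, b = t[0], t[1]
--         if b == 'z':
--             a, b = chr(ord(a) + 1), 'a'
--         else:
--             b = chr(ord(b) + 1)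
--         t = (a + b + '%').replace('%', '#')
--         if t not in vset:
--             return t.replace('#', '%')
--
-- def make_variables_standardize(rule, temp, variables_in_unification_map):
--     vset = set(variables_in_unification_map)
--     # one reverse pass: for each '(' collect the characters up to the next ')'
--     groups = []
--     nxt = None
--     for ch in reversed(rule):
--         if ch == ')':
--             nxt = ''
--         elif nxt is not None:
--             if ch == '(':
--                 groups.append(nxt)
--             nxt = ch + nxt
--     groups.reverse()
--     subs = {}
--     t = temp
--     for g in groups:
--         for v in g.split(','):
--             if v and v[0].islower() and v not in subs:
--                 t = _fresh(t, vset)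
--                 subs[v] = t
--     new_rule = rule
--     for key, val in sorted(subs.items(), key=lambda kv: kv[0], reverse=True):
--         name = key.replace('%', '#')
--         if name not in vset:
--             for a, b in (('(', ','), (',', ','), (',', ')'), ('(', ')')):
--                 new_rule = new_rule.replace(a + name + b, a + val + b)
--     return new_rule.replace('%', '#'), t.replace('%', '#')
-- ===== Notes on version B (the rewrite author's own statement) =====
-- stated objective: alternative
-- what changed: A rescans forward from every '(' for its closing ')' (nested loops) and mutates the fresh name by repeated string surgery; B makes one reverse pass over the rule carrying the text up to the next ')', so each '(' gets its argument segment from that pass, advances the two-character counter directly, pre-builds the exclusion set once, and phase 2 walks sorted(items) in reverse instead of re-looking every key up.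
-- outside the precondition, e.g. on make_variables_standardize('P(a%)', 'Aa', {'a#'}): A returns ('P(a#)', 'Ab#'), B returns ('P(a#)', 'Ab#')
import Mathlib
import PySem

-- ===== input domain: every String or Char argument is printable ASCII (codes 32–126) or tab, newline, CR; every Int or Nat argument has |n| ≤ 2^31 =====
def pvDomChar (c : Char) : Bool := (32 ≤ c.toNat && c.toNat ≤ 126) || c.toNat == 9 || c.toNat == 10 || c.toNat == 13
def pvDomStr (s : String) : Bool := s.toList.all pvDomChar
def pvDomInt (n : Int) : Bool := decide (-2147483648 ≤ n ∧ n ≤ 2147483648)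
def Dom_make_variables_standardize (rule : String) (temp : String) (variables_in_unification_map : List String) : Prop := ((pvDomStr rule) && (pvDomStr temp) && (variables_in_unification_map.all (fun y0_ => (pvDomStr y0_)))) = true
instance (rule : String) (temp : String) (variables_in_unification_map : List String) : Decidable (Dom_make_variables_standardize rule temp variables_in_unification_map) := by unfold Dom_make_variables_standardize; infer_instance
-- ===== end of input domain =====

-- B replaces A's nested "for every '(' rescan forward for the next ')'" by one reverse pass that
-- carries the text up to the next ')' (objective: alternative single-pass structure; same cost).

-- ===== PORT A =====
-- standardize_local(std_var)
def pvStdLocal (t : List Char) : List Char :=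
  let c0 := PySem.List.pyGetD t 0 ' '
  let c1 := PySem.List.pyGetD t 1 ' '
  if c1 = 'z' then [Char.ofNat (c0.toNat + 1), 'a', '%']
  else [c0, Char.ofNat (c1.toNat + 1), '%']

-- temp = standardize_local(temp); temp = temp.replace('%', '#')
def pvStepA (t : List Char) : List Char := PySem.Chars.replace (pvStdLocal t) ['%'] ['#']

-- while temp in variables_in_unification_map: …  (fuel bounds the loop; the Python loop needs at
-- most |variables_in_unification_map| iterations since successive candidates are distinct)
def pvWhileA (vls : List (List Char)) : Nat → List Char → List Char
  | 0, t => t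
  | n + 1, t => if t ∈ vls then pvWhileA vls n (pvStepA t) else t

def pvFreshA (vls : List (List Char)) (t : List Char) : List Char :=
  PySem.Chars.replace (pvWhileA vls (vls.length + 1) (pvStepA t)) ['#'] ['%']

-- the body of "for j in range(len(variables)): …" over one parenthesized group
def pvProcA (vls : List (List Char))
    (st : PySem.Dict (List Char) (List Char) × List Char) (content : List Char) :
    PySem.Dict (List Char) (List Char) × List Char :=
  (PySem.Chars.splitOn content [',']).foldl (fun st p =>
    if PySem.Chars.islower (PySem.List.pyGetD p 0 ' ') && !(st.1.contains p) then
      let t := pvFreshA vls st.2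
      (st.1.insert p t, t)
    else st) st

-- inner "for i in range(ind+1, len(rule)): if rule[i] == ')': … break" : the text up to the first ')'
def pvFindCloseA : List Char → Option (List Char)
  | [] => none
  | c :: rest => if c = ')' then some [] else (pvFindCloseA rest).map (c :: ·)

-- outer "for ind in range(len(rule)): if rule[ind] == '(': …"
def pvPhase1A (vls : List (List Char)) :
    List Char → PySem.Dict (List Char) (List Char) × List Char →
    PySem.Dict (List Char) (List Char) × List Char
  | [], st => st
  | c :: rest, st =>
    pvPhase1A vls rest
      (if c = '(' then
        match pvFindCloseA rest with
        | some content => pvProcA vls st content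
        | none => st
      else st)

-- replace_string(unified_string, query_var, var)
def pvReplaceStringA (u q v : List Char) : List Char :=
  let u1 := PySem.Chars.replace u ('(' :: q ++ [',']) ('(' :: v ++ [','])
  let u2 := PySem.Chars.replace u1 (',' :: q ++ [',']) (',' :: v ++ [','])
  let u3 := PySem.Chars.replace u2 (',' :: q ++ [')']) (',' :: v ++ [')'])
  PySem.Chars.replace u3 ('(' :: q ++ [')']) ('(' :: v ++ [')'])

def make_variables_standardize (rule : String) (temp : String) (variables_in_unification_map : List String) : String × String :=
  let vls := variables_in_unification_map.map String.toList
  let st := pvPhase1A vls rule.toList (PySem.Dict.empty, temp.toList)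
  -- for var in reversed(sorted(variable_map.keys())): …  (variable_map[var] is looked up at the
  -- '%'→'#'-replaced name, exactly as A does; getD [] totalizes A's KeyError, excluded by Pre_)
  let newRule := ((PySem.List.sorted st.1.keys (fun k => k) false).reverse).foldl
    (fun nr k =>
      let v := PySem.Chars.replace k ['%'] ['#']
      if v ∈ vls then nr else pvReplaceStringA nr v (st.1.getD v [])) rule.toList
  (String.ofList (PySem.Chars.replace newRule ['%'] ['#']),
   String.ofList (PySem.Chars.replace st.2 ['%'] ['#']))

-- ===== PORT B =====
-- the step inside _fresh: advance the two-character counter, mark with '#'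
def pvNextB (t : List Char) : List Char :=
  let a := PySem.List.pyGetD t 0 ' '
  let b := PySem.List.pyGetD t 1 ' '
  let p := if b = 'z' then (Char.ofNat (a.toNat + 1), 'a') else (a, Char.ofNat (b.toNat + 1))
  PySem.Chars.replace [p.1, p.2, '%'] ['%'] ['#']

-- _fresh(t, vset) (fuel bounds Source B's "while True", which returns within |vset|+1 steps)
def pvFreshB (vset : List (List Char)) : Nat → List Char → List Char
  | 0, t => PySem.Chars.replace (pvNextB t) ['#'] ['%']
  | n + 1, t =>
    let c := pvNextB t
    if c ∈ vset then pvFreshB vset n c else PySem.Chars.replace c ['#'] ['%']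

-- the reverse pass "for ch in reversed(rule): …": returns (groups, text up to the next ')')
def pvGb : List Char → List (List Char) × Option (List Char)
  | [] => ([], none)
  | c :: rest =>
    let r := pvGb rest
    if c = ')' then (r.1, some [])
    else
      match r.2 with
      | none => (r.1, none)
      | some content => (if c = '(' then content :: r.1 else r.1, some (c :: content))

-- "for v in g.split(','): if v and v[0].islower() and v not in subs: …"
def pvProcB (vset : List (List Char)) (fuel : Nat)
    (st : PySem.Dict (List Char) (List Char) × List Char) (g : List Char) :
    PySem.Dict (List Char) (List Char) × List Char :=
  (PySem.Chars.splitOn g [',']).foldl (fun st p =>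
    match p with
    | [] => st
    | c :: _ =>
      if PySem.Chars.islower c && !(st.1.contains p) then
        let f := pvFreshB vset fuel st.2
        (st.1.insert p f, f)
      else st) st

def make_variables_standardize_alt (rule : String) (temp : String) (variables_in_unification_map : List String) : String × String :=
  let vls := variables_in_unification_map.map String.toList
  let vset := PySem.Set.ofList vls
  let st := ((pvGb rule.toList).1).foldl (pvProcB vset (vls.length + 1))
    (PySem.Dict.empty, temp.toList)
  -- for key, val in sorted(subs.items(), key=…, reverse=True): …
  let newRule := (PySem.List.sorted st.1.items (fun kv => kv.1) true).foldl
    (fun nr kv =>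
      let name := PySem.Chars.replace kv.1 ['%'] ['#']
      if name ∈ vset then nr
      else [('(', ','), (',', ','), (',', ')'), ('(', ')')].foldl
        (fun nr ab => PySem.Chars.replace nr (ab.1 :: name ++ [ab.2]) (ab.1 :: kv.2 ++ [ab.2])) nr) rule.toList
  (String.ofList (PySem.Chars.replace newRule ['%'] ['#']),
   String.ofList (PySem.Chars.replace st.2 ['%'] ['#']))

-- ===== PRECONDITION & SPEC =====
-- the comma-separated pieces of every "(…)" group of the rule: a '(' at position i whose suffix
-- still holds a ')' contributes the text from i+1 up to that next ')'
def pvPieces (r : List Char) : List (List Char) :=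
  (List.range r.length).flatMap (fun i =>
    if r[i]? = some '(' ∧ ')' ∈ r.drop (i + 1)
    then PySem.Chars.splitOn ((r.drop (i + 1)).takeWhile (fun c => c ≠ ')')) [',']
    else [])

def pvLowerHead : List Char → Bool
  | [] => false
  | c :: _ => PySem.Chars.islower c

-- Pre_ excludes exactly the inputs on which A raises (IndexError on an empty piece or a too-short
-- temp, KeyError when a standardized name contains A's sentinel '%'), plus — same sentence — rules
-- whose lowercase variable names contain the sentinel '%', on which A's '%'→'#' key roundtrip makes
-- the phase-2 lookup accidental (KeyError or another variable's replacement).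
def Pre_make_variables_standardize (rule : String) (temp : String) (variables_in_unification_map : List String) : Prop :=
  (∀ p ∈ pvPieces rule.toList, p ≠ []) ∧
  ((∃ p ∈ pvPieces rule.toList, pvLowerHead p = true) → 2 ≤ temp.toList.length) ∧
  (∀ p ∈ pvPieces rule.toList, pvLowerHead p = true → '%' ∉ p)
instance (rule : String) (temp : String) (variables_in_unification_map : List String) : Decidable (Pre_make_variables_standardize rule temp variables_in_unification_map) := by unfold Pre_make_variables_standardize; infer_instance

def pvWitness_make_variables_standardize : String × String × List String :=
  ("Axy(x,Bob) => Mother(x)", "aa", ["ab#"])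

def Spec_make_variables_standardize (rule : String) (temp : String) (variables_in_unification_map : List String) (out : String × String) : Prop := out = make_variables_standardize_alt rule temp variables_in_unification_map
instance (rule : String) (temp : String) (variables_in_unification_map : List String) (out : String × String) : Decidable (Spec_make_variables_standardize rule temp variables_in_unification_map out) := by unfold Spec_make_variables_standardize; infer_instance

-- ===== CLAIM (what is proved, stated in full; the proofs are below) =====
def Claim_equal_make_variables_standardize : Prop := ∀ (rule : String) (temp : String) (variables_in_unification_map : List String), Dom_make_variables_standardize rule temp variables_in_unification_map → Pre_make_variables_standardize rule temp variables_in_unification_map → Spec_make_variables_standardize rule temp variables_in_unification_map (make_variables_standardize rule temp variables_in_unification_map)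


-- ===== LEMMAS AND PROOFS =====

-- single-character str.replace is a character map
theorem pv_replace_go_single (a b : Char) :
    ∀ (fuel : Nat) (l acc : List Char), l.length ≤ fuel →
      PySem.Chars.replace.go [a] [b] fuel l acc =
        acc.reverse ++ l.map (fun c => if c = a then b else c) := by
  intro fuel
  induction fuel with
  | zero =>
    intro l acc h
    have : l = [] := List.eq_nil_of_length_eq_zero (Nat.le_zero.mp h)
    subst this
    simp [PySem.Chars.replace.go]
  | succ n ih =>
    intro l acc h
    cases l with
    | nil => simp [PySem.Chars.replace.go]
    | cons c t =>
      simp only [PySem.Chars.replace.go, List.isPrefixOf]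
      by_cases hc : a = c
      · subst hc
        rw [if_pos (by simp)]
        simp only [List.length_cons, List.drop_succ_cons, List.length_nil, List.drop_zero]
        rw [ih t _ (by simpa using h)]
        simp
      · rw [if_neg (by simp [hc])]
        rw [ih t _ (by simpa using h)]
        simp [Ne.symm hc]

theorem pv_replace_single (s : List Char) (a b : Char) :
    PySem.Chars.replace s [a] [b] = s.map (fun c => if c = a then b else c) := by
  rw [PySem.Chars.replace]
  simp only [List.isEmpty_cons]
  rw [pv_replace_go_single a b s.length s [] le_rfl]
  simp

theorem pv_replace_single_id (s : List Char) (a b : Char) (h : a ∉ s) :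
    PySem.Chars.replace s [a] [b] = s := by
  rw [pv_replace_single]
  conv_rhs => rw [← List.map_id s]
  apply List.map_congr_left
  intro c hc
  have : c ≠ a := fun he => h (he ▸ hc)
  simp [this]

theorem pv_gb_snd (l : List Char) : (pvGb l).2 = pvFindCloseA l := by
  induction l with
  | nil => rfl
  | cons c rest ih =>
    simp only [pvGb, pvFindCloseA]
    by_cases hc : c = ')'
    · simp [hc]
    · rw [if_neg hc, if_neg hc, ← ih]
      cases (pvGb rest).2 <;> simp


theorem pv_findClose_char (l : List Char) :
    pvFindCloseA l = if ')' ∈ l then some (l.takeWhile (fun c => c ≠ ')')) else none := by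
  induction l with
  | nil => rfl
  | cons c t ih =>
    by_cases hc : c = ')'
    · simp [pvFindCloseA, hc]
    · simp only [pvFindCloseA, if_neg hc, ih]
      by_cases hm : ')' ∈ t <;> simp [hm, hc, Ne.symm hc]

theorem pv_groups_spec (r : List Char) :
    (List.range r.length).flatMap (fun i =>
      if r[i]? = some '(' ∧ ')' ∈ r.drop (i + 1)
      then [(r.drop (i + 1)).takeWhile (fun c => c ≠ ')')] else [])
    = (pvGb r).1 := by
  induction r with
  | nil => rfl
  | cons c t ih =>
    rw [List.length_cons, List.range_succ_eq_map, List.flatMap_cons, List.flatMap_map]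
    have hrest : (List.range t.length).flatMap (fun i =>
        if (c :: t)[i.succ]? = some '(' ∧ ')' ∈ (c :: t).drop (i.succ + 1)
        then [((c :: t).drop (i.succ + 1)).takeWhile (fun c => c ≠ ')')] else [])
        = (pvGb t).1 := by
      rw [← ih]
      apply List.flatMap_congr
      intro i _
      simp only [Nat.succ_eq_add_one, List.getElem?_cons_succ, List.drop_succ_cons]
    rw [hrest]
    simp only [pvGb]
    rw [pv_gb_snd, pv_findClose_char]
    by_cases hc : c = ')'
    · simp [hc]
    · by_cases hp : c = '('
      · by_cases hm : ')' ∈ t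
        · simp [hp, hm]
        · simp [hp, hm]
      · simp [hp, hc]
        by_cases hm : ')' ∈ t <;> simp [hm]

theorem pv_pieces_eq (r : List Char) :
    pvPieces r = ((pvGb r).1).flatMap (fun g => PySem.Chars.splitOn g [',']) := by
  rw [← pv_groups_spec, List.flatMap_assoc]
  unfold pvPieces
  apply List.flatMap_congr
  intro i _
  by_cases h : r[i]? = some '(' ∧ ')' ∈ r.drop (i + 1) <;> simp [h]

theorem pv_phase1 (vls : List (List Char)) :
    ∀ (l : List Char) (st : PySem.Dict (List Char) (List Char) × List Char),
      pvPhase1A vls l st = ((pvGb l).1).foldl (pvProcA vls) st := by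
  intro l
  induction l with
  | nil => intro st; rfl
  | cons c rest ih =>
    intro st
    simp only [pvPhase1A, pvGb]
    by_cases hc : c = ')'
    · rw [if_pos hc, if_neg (by rw [hc]; decide), ih]
    · rw [if_neg hc]
      rw [pv_gb_snd]
      by_cases hp : c = '('
      · rw [if_pos hp]
        cases hfc : pvFindCloseA rest with
        | none => simp [ih]
        | some content => simp [hp, ih]
      · rw [if_neg hp]
        cases hfc : pvFindCloseA rest with
        | none => simp [ih]
        | some content => simp [hp, ih]

theorem pv_next_eq_step : pvNextB = pvStepA := by
  funext t
  simp only [pvNextB, pvStepA, pvStdLocal]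
  by_cases hb : PySem.List.pyGetD t 1 ' ' = 'z' <;> simp [hb]

theorem pv_fresh_eq (vls : List (List Char)) :
    ∀ (n : Nat) (t : List Char),
      pvFreshB (PySem.Set.ofList vls) n t =
        PySem.Chars.replace (pvWhileA vls n (pvStepA t)) ['#'] ['%'] := by
  intro n
  induction n with
  | zero => intro t; simp [pvFreshB, pvWhileA, pv_next_eq_step]
  | succ m ih =>
    intro t
    simp only [pvFreshB, pvWhileA, pv_next_eq_step]
    by_cases hm : pvStepA t ∈ vls
    · rw [if_pos (by simp [PySem.Set.mem_ofList, hm]), if_pos hm, ih]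
    · rw [if_neg (by simp [PySem.Set.mem_ofList, hm]), if_neg hm]

theorem pv_proc_eq (vls : List (List Char)) :
    pvProcB (PySem.Set.ofList vls) (vls.length + 1) = pvProcA vls := by
  funext st g
  simp only [pvProcB, pvProcA]
  congr 1
  funext st p
  cases p with
  | nil =>
    have hl : PySem.Chars.islower (PySem.List.pyGetD ([] : List Char) 0 ' ') = false := by decide
    simp [hl]
  | cons c cs =>
    dsimp only
    rw [PySem.List.pyGetD_zero_cons]
    by_cases hg : (PySem.Chars.islower c && !(st.1.contains (c :: cs))) = true
    · rw [if_pos hg, if_pos hg]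
      simp [pv_fresh_eq, pvFreshA]
    · rw [if_neg hg, if_neg hg]

-- keys produced by phase 1 are lowercase-headed pieces of the rule's groups
theorem pv_keys_sub (vls : List (List Char)) :
    ∀ (gs : List (List Char)) (st : PySem.Dict (List Char) (List Char) × List Char)
      (k : List Char), k ∈ (gs.foldl (pvProcA vls) st).1.keys →
      k ∈ st.1.keys ∨ (pvLowerHead k = true ∧
        k ∈ gs.flatMap (fun g => PySem.Chars.splitOn g [','])) := by
  have inner : ∀ (ps : List (List Char)) (st : PySem.Dict (List Char) (List Char) × List Char)
      (k : List Char), k ∈ (ps.foldl (fun st p =>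
        if PySem.Chars.islower (PySem.List.pyGetD p 0 ' ') && !(st.1.contains p) then
          let t := pvFreshA vls st.2
          (st.1.insert p t, t)
        else st) st).1.keys → k ∈ st.1.keys ∨ (pvLowerHead k = true ∧ k ∈ ps) := by
    intro ps
    induction ps with
    | nil => intro st k hk; exact Or.inl hk
    | cons p ps ih =>
      intro st k hk
      rcases ih _ k hk with hk' | ⟨hl, hm⟩
      · dsimp only at hk'
        by_cases hg : (PySem.Chars.islower (PySem.List.pyGetD p 0 ' ') && !(st.1.contains p)) = true
        · rw [if_pos hg] at hk'
          rcases (PySem.Dict.mem_keys_insert _ _ _ _).mp hk' with hkp | hks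
          · subst hkp
            refine Or.inr ⟨?_, List.mem_cons_self⟩
            cases k with
            | nil => exact absurd (Bool.and_elim_left hg) (by decide)
            | cons c cs =>
              have := Bool.and_elim_left hg
              rw [PySem.List.pyGetD_zero_cons] at this
              simpa [pvLowerHead] using this
          · exact Or.inl hks
        · rw [if_neg hg] at hk'
          exact Or.inl hk'
      · exact Or.inr ⟨hl, List.mem_cons_of_mem _ hm⟩
  intro gs
  induction gs with
  | nil => intro st k hk; exact Or.inl hk
  | cons g gs ih =>
    intro st k hk
    rcases ih _ k hk with hk' | ⟨hl, hm⟩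
    · rcases inner _ _ _ hk' with hks | ⟨hl, hm⟩
      · exact Or.inl hks
      · exact Or.inr ⟨hl, by simpa using Or.inl hm⟩
    · exact Or.inr ⟨hl, by simpa using Or.inr (by simpa using hm)⟩

theorem pv_keys_nodup (vls : List (List Char)) :
    ∀ (gs : List (List Char)) (st : PySem.Dict (List Char) (List Char) × List Char),
      st.1.keys.Nodup → (gs.foldl (pvProcA vls) st).1.keys.Nodup := by
  have inner : ∀ (ps : List (List Char)) (st : PySem.Dict (List Char) (List Char) × List Char),
      st.1.keys.Nodup → (ps.foldl (fun st p =>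
        if PySem.Chars.islower (PySem.List.pyGetD p 0 ' ') && !(st.1.contains p) then
          let t := pvFreshA vls st.2
          (st.1.insert p t, t)
        else st) st).1.keys.Nodup := by
    intro ps
    induction ps with
    | nil => intro st h; exact h
    | cons p ps ih =>
      intro st h
      apply ih
      dsimp only
      by_cases hg : (PySem.Chars.islower (PySem.List.pyGetD p 0 ' ') && !(st.1.contains p)) = true
      · rw [if_pos hg]; exact PySem.Dict.nodup_keys_insert _ _ _ h
      · rw [if_neg hg]; exact h
  intro gs
  induction gs with
  | nil => intro st h; exact h
  | cons g gs ih =>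
    intro st h
    exact ih _ (inner _ _ h)


-- the two DecidableLT instances Lean elaborates for sorting (List Char)-keyed data coincide
theorem pv_sorted_inst {α : Type} (xs : List α) (key : α → List Char) (rev : Bool) :
    @PySem.List.sorted α (List Char) List.instLT (fun a b => a.decidableLT b) xs key rev
    = @PySem.List.sorted α (List Char) List.instLinearOrder.toLT
        LinearOrder.toDecidableLT xs key rev := by
  have h : (fun (a b : List Char) => a.decidableLT b)
      = (LinearOrder.toDecidableLT (α := List Char)) := by
    funext a b; exact Subsingleton.elim _ _
  rw [h]

-- phase 2: B's descending items fold is A's reversed-sorted-keys fold (keys unique and '%'-free)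
theorem pv_phase2 (vls : List (List Char)) (d : PySem.Dict (List Char) (List Char)) (r0 : List Char)
    (hnd : d.keys.Nodup) (hpct : ∀ k ∈ d.keys, '%' ∉ k) :
    (PySem.List.sorted d.items (fun kv => kv.1) true).foldl
      (fun nr kv =>
        let name := PySem.Chars.replace kv.1 ['%'] ['#']
        if name ∈ PySem.Set.ofList vls then nr
        else [('(', ','), (',', ','), (',', ')'), ('(', ')')].foldl
          (fun nr ab => PySem.Chars.replace nr (ab.1 :: name ++ [ab.2]) (ab.1 :: kv.2 ++ [ab.2])) nr) r0
    = ((PySem.List.sorted d.keys (fun k => k) false).reverse).foldl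
      (fun nr k =>
        let v := PySem.Chars.replace k ['%'] ['#']
        if v ∈ vls then nr else pvReplaceStringA nr v (d.getD v [])) r0 := by
  rw [pv_sorted_inst, pv_sorted_inst]
  have hperm : (((@PySem.List.sorted (List Char) (List Char) List.instLinearOrder.toLT
      LinearOrder.toDecidableLT d.keys (fun k => k) false).reverse).map
      (fun k => (k, d.getD k []))).Perm d.items := by
    rw [PySem.Dict.items_eq_map_keys d hnd []]
    exact ((List.reverse_perm _).trans (@PySem.List.sorted_perm (List Char) (List Char) List.instLinearOrder.toLT LinearOrder.toDecidableLT d.keys (fun k => k) false)).map _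
  have hle := PySem.List.sorted_pairwise d.keys (fun k : List Char => k)
  have hndk : (@PySem.List.sorted (List Char) (List Char) List.instLinearOrder.toLT
      LinearOrder.toDecidableLT d.keys (fun k => k) false).Nodup :=
    ((@PySem.List.sorted_perm (List Char) (List Char) List.instLinearOrder.toLT LinearOrder.toDecidableLT d.keys (fun k => k) false).nodup_iff).mpr hnd
  have hne : List.Pairwise (fun a b : List Char => a ≠ b)
      (@PySem.List.sorted (List Char) (List Char) List.instLinearOrder.toLT
        LinearOrder.toDecidableLT d.keys (fun k => k) false) := hndk
  have hlt : (@PySem.List.sorted (List Char) (List Char) List.instLinearOrder.toLT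
      LinearOrder.toDecidableLT d.keys (fun k => k) false).Pairwise (· < ·) :=
    (hle.and hne).imp (fun h => lt_of_le_of_ne h.1 h.2)
  have hpair : (((@PySem.List.sorted (List Char) (List Char) List.instLinearOrder.toLT
      LinearOrder.toDecidableLT d.keys (fun k => k) false).reverse).map
      (fun k => (k, d.getD k []))).Pairwise
      (fun a b => (fun kv : List Char × List Char => kv.1) b < (fun kv => kv.1) a) := by
    rw [List.pairwise_map, List.pairwise_reverse]
    exact hlt.imp (fun h => h)
  rw [PySem.List.sorted_rev_eq_of_perm_of_pairwise_gt d.items _ _ hperm hpair, List.foldl_map]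
  apply PySem.List.foldl_congr_mem
  intro acc k hkmem
  have hk : k ∈ d.keys :=
    (@PySem.List.sorted_perm (List Char) (List Char) List.instLinearOrder.toLT LinearOrder.toDecidableLT d.keys (fun k => k) false).mem_iff.mp
      (List.mem_reverse.mp hkmem)
  have hrep : PySem.Chars.replace k ['%'] ['#'] = k := pv_replace_single_id _ _ _ (hpct k hk)
  dsimp only
  rw [hrep, if_congr (PySem.Set.mem_ofList vls k) rfl rfl]
  by_cases hin : k ∈ vls
  · rw [if_pos hin, if_pos hin]
  · rw [if_neg hin, if_neg hin]
    simp [pvReplaceStringA]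

-- ===== VERDICT (by name: the statement is the Claim_ definition above) =====
theorem make_variables_standardize_spec : Claim_equal_make_variables_standardize := by
  unfold Claim_equal_make_variables_standardize
  intro rule temp vl _hdom hpre
  unfold Pre_make_variables_standardize at hpre
  obtain ⟨hne, hlen, hpct⟩ := hpre
  rw [pv_pieces_eq] at hpct
  unfold Spec_make_variables_standardize make_variables_standardize make_variables_standardize_alt
  dsimp only
  have hst : ((pvGb rule.toList).1).foldl
      (pvProcB (PySem.Set.ofList (vl.map String.toList)) ((vl.map String.toList).length + 1))
      (PySem.Dict.empty, temp.toList)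
      = pvPhase1A (vl.map String.toList) rule.toList (PySem.Dict.empty, temp.toList) := by
    rw [pv_phase1, pv_proc_eq]
  rw [hst]
  have hfold : pvPhase1A (vl.map String.toList) rule.toList (PySem.Dict.empty, temp.toList)
      = ((pvGb rule.toList).1).foldl (pvProcA (vl.map String.toList))
        (PySem.Dict.empty, temp.toList) := pv_phase1 _ _ _
  have hnd : (pvPhase1A (vl.map String.toList) rule.toList
      (PySem.Dict.empty, temp.toList)).1.keys.Nodup := by
    rw [hfold]
    exact pv_keys_nodup _ _ _ (by simp [PySem.Dict.keys_empty])
  have hpk : ∀ k ∈ (pvPhase1A (vl.map String.toList) rule.toList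
      (PySem.Dict.empty, temp.toList)).1.keys, '%' ∉ k := by
    intro k hk
    rw [hfold] at hk
    rcases pv_keys_sub _ _ _ _ hk with hk0 | ⟨hl, hm⟩
    · simp [PySem.Dict.keys_empty] at hk0
    · exact hpct k hm hl
  rw [pv_phase2 _ _ _ hnd hpk]
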